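-- pv_equiv track=rewrite | github.com/Kazun1998/library_for_python | Convolution/MAX_Convolution.py | Convolution_MAX
-- ===== SOURCE A (Python) =====
-- def Less_Zeta_Transform(A):
--     """ A の以下を走る Zeta 変換を行う.
--
--     """
--     for i in range(1,len(A)):
--         A[i]=(A[i-1]+A[i])%Mod
--
-- def Less_Mobius_Transform(A):
--     """ A の以下を走るにおける Mobius 変換を行う.
--
--     """
--
--     for i in range(len(A)-1,0,-1):
--         A[i]=(A[i]-A[i-1])%Mod
--
-- def Convolution_MAX(A,B):
--     """ A,B の max における畳み込みを行う.
--     """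
--
--     N=len(A); M=len(B)
--     L=max(N,M)
--
--     A=A+[0]*(L-N)
--     B=B+[0]*(L-M)
--
--     Less_Zeta_Transform(A)
--     Less_Zeta_Transform(B)
--
--     for i in range(L):
--         A[i]*=B[i]
--         A[i]%=Mod
--
--     Less_Mobius_Transform(A)
--     return A
--
-- Mod=998244353
-- ===== SOURCE B (Python) =====
-- Mod = 998244353
--
-- def Convolution_MAX(A, B):
--     """ A,B の max における畳み込みを行う (naive direct summation). """
--     N = len(A); M = len(B)
--     L = max(N, M)
--     C = [0] * L
--     for i in range(N):
--         for j in range(M):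
--             k = max(i, j)
--             C[k] = (C[k] + A[i] * B[j]) % Mod
--     return C
-- ===== Notes on version B (the rewrite author's own statement) =====
-- stated objective: alternative
-- what changed: B computes the max-convolution directly from its definition, accumulating A[i]*B[j] into C[max(i,j)] over all index pairs, instead of A's pipeline of prefix-sum (zeta) transforms, pointwise product and difference (Mobius) transform.
import Mathlib
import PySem

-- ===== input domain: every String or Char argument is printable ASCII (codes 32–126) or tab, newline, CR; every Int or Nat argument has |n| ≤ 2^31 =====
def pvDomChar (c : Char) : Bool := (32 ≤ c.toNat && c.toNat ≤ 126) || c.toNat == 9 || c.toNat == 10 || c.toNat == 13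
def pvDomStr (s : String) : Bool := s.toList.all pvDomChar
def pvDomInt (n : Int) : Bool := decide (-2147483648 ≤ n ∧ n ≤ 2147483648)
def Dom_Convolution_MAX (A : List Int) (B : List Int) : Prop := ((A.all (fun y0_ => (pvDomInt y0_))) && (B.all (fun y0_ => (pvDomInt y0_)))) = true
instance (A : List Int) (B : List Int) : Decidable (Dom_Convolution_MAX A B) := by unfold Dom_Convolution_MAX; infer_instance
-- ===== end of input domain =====

-- B replaces A's zeta-transform / pointwise-product / Mobius-transform pipeline by direct
-- naive summation of A[i]*B[j] into C[max(i,j)] (alternative algorithm, not faster).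

-- ===== PORT A =====
def pvMod : Int := 998244353

-- Less_Zeta_Transform: 'for i in range(1, len(A)): A[i] = (A[i-1] + A[i]) % Mod'
-- (in-place index loop as recursion over the running index; all indices are in range,
--  so list.getD/list.set are exact; Python '%' with the positive Mod is Int.emod)
def lessZetaAux (C : List Int) (i : Nat) : List Int :=
  if h : i < C.length then
    lessZetaAux (C.set i ((C.getD (i - 1) 0 + C.getD i 0).emod pvMod)) (i + 1)
  else C
termination_by C.length - i
decreasing_by simp [List.length_set]; omega

-- Less_Mobius_Transform: 'for i in range(len(A)-1, 0, -1): A[i] = (A[i] - A[i-1]) % Mod'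
-- (descending index loop as recursion on the index, called with len(A)-1)
def lessMobiusAux : List Int → Nat → List Int
  | C, 0 => C
  | C, (i + 1) => lessMobiusAux (C.set (i + 1) ((C.getD (i + 1) 0 - C.getD i 0).emod pvMod)) i

-- 'for i in range(L): A[i] *= B[i]; A[i] %= Mod'
def mulModAux (C D : List Int) (i : Nat) : List Int :=
  if h : i < C.length then
    mulModAux (C.set i ((C.getD i 0 * D.getD i 0).emod pvMod)) D (i + 1)
  else C
termination_by C.length - i
decreasing_by simp [List.length_set]; omega

def Convolution_MAX (A : List Int) (B : List Int) : List Int :=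
  let N := A.length
  let M := B.length
  let L := max N M
  let A1 := A ++ List.replicate (L - N) 0
  let B1 := B ++ List.replicate (L - M) 0
  let A2 := lessZetaAux A1 1
  let B2 := lessZetaAux B1 1
  let A3 := mulModAux A2 B2 0
  lessMobiusAux A3 (L - 1)

-- ===== PORT B =====
-- C = [0]*L; for i in range(N): for j in range(M): k = max(i,j); C[k] = (C[k] + A[i]*B[j]) % Mod
def Convolution_MAX_alt (A : List Int) (B : List Int) : List Int :=
  let N := A.length
  let M := B.length
  let L := max N M
  (List.range N).foldl
    (fun C i =>
      (List.range M).foldl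
        (fun C j =>
          let k := max i j
          C.set k ((C.getD k 0 + A.getD i 0 * B.getD j 0).emod pvMod)) C)
    (List.replicate L 0)

-- ===== PRECONDITION & SPEC =====
def Spec_Convolution_MAX (A : List Int) (B : List Int) (out : List Int) : Prop := out = Convolution_MAX_alt A B
instance (A : List Int) (B : List Int) (out : List Int) : Decidable (Spec_Convolution_MAX A B out) := by unfold Spec_Convolution_MAX; infer_instance

-- ===== CLAIM (what is proved, stated in full; the proofs are below) =====
def Claim_equal_Convolution_MAX : Prop := ∀ (A : List Int) (B : List Int), Dom_Convolution_MAX A B → Spec_Convolution_MAX A B (Convolution_MAX A B)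

-- ===== LEMMAS AND PROOFS =====

-- integer prefix sum of the first k entries (out-of-range entries read as 0, like the padding)
def pvPS (X : List Int) (k : Nat) : Int := ∑ i ∈ Finset.range k, X.getD i 0

-- the k-th entry of the max-convolution, as a double sum over the (k+1)×(k+1) square
def pvT (A B : List Int) (k : Nat) : Int :=
  ∑ i ∈ Finset.range (k + 1), ∑ j ∈ Finset.range (k + 1),
    (if max i j = k then A.getD i 0 * B.getD j 0 else 0)

lemma pvGetD_set (l : List Int) (i j : Nat) (a d : Int) :
    (l.set i a).getD j d = if i = j ∧ i < l.length then a else l.getD j d := by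
  simp only [List.getD_eq_getElem?_getD, List.getElem?_set]
  split_ifs with h1 h2 h3 h4
  all_goals (try simp_all)
  all_goals omega

lemma pvEmod_add_left (a b : Int) : (a % pvMod + b) % pvMod = (a + b) % pvMod := by
  conv_lhs => rw [Int.add_emod, Int.emod_emod_of_dvd _ dvd_rfl, ← Int.add_emod]

lemma pvGetD_pad (A : List Int) (n k : Nat) :
    (A ++ List.replicate n 0).getD k 0 = A.getD k 0 := by
  by_cases h : k < A.length
  · exact List.getD_append _ _ _ _ h
  · have hr : A.getD k 0 = 0 := List.getD_eq_default _ _ (by omega)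
    rw [hr, List.getD_eq_getElem?_getD, List.getElem?_append_right (by omega)]
    rcases lt_or_ge (k - A.length) n with h2 | h2
    · simp [h2]
    · simp [Nat.not_lt.2 h2]

lemma zeta_spec (X : List Int) (C : List Int) (i : Nat) :
    1 ≤ i → C.length = X.length →
    (∀ k, i ≤ k → C.getD k 0 = X.getD k 0) →
    C.getD 0 0 = X.getD 0 0 →
    (∀ k, 1 ≤ k → k < i → C.getD k 0 = (pvPS X (k + 1)).emod pvMod) →
    (lessZetaAux C i).length = X.length ∧
    (lessZetaAux C i).getD 0 0 = X.getD 0 0 ∧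
    ∀ k, 1 ≤ k → k < X.length → (lessZetaAux C i).getD k 0 = (pvPS X (k + 1)).emod pvMod := by
  induction C, i using lessZetaAux.induct with
  | case1 C i h ih =>
    intro hi hlen hup h0 hlow
    rw [lessZetaAux, dif_pos h]
    apply ih (by omega) (by simp [hlen])
    · intro k hk
      rw [pvGetD_set]
      rw [if_neg (by omega)]
      exact hup k (by omega)
    · rw [pvGetD_set, if_neg (by omega)]
      exact h0
    · intro k hk1 hk2
      rw [pvGetD_set]
      by_cases hki : k = i
      · subst hki
        rw [if_pos ⟨rfl, h⟩]
        have hCi : C.getD k 0 = X.getD k 0 := hup k le_rfl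
        have hstep : Int.emod (C.getD (k - 1) 0 + X.getD k 0) pvMod
            = Int.emod (pvPS X k + X.getD k 0) pvMod := by
          by_cases hk1' : k = 1
          · subst hk1'
            rw [h0]
            have : pvPS X 1 = X.getD 0 0 := by simp [pvPS]
            rw [this]
          · have : C.getD (k - 1) 0 = (pvPS X (k - 1 + 1)).emod pvMod :=
              hlow (k - 1) (by omega) (by omega)
            rw [this]
            have he : k - 1 + 1 = k := by omega
            rw [he]; exact pvEmod_add_left _ _
        have hsum : pvPS X (k + 1) = pvPS X k + X.getD k 0 := by
          simp [pvPS, Finset.sum_range_succ]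
        rw [hCi, hstep, hsum]
      · rw [if_neg (by omega)]
        exact hlow k hk1 (by omega)
  | case2 C i h =>
    intro hi hlen hup h0 hlow
    rw [lessZetaAux, dif_neg h]
    exact ⟨hlen, h0, fun k hk1 hk2 => hlow k hk1 (by omega)⟩

lemma mulmod_spec (D : List Int) (C : List Int) (i : Nat) :
    (mulModAux C D i).length = C.length ∧
    ∀ k, k < C.length → (mulModAux C D i).getD k 0 =
      if i ≤ k then (C.getD k 0 * D.getD k 0).emod pvMod else C.getD k 0 := by
  induction C, i using mulModAux.induct D with
  | case1 C i h ih =>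
    rw [mulModAux, dif_pos h]
    obtain ⟨ihl, ihc⟩ := ih
    refine ⟨by simpa using ihl, ?_⟩
    intro k hk
    rw [ihc k (by simpa using hk)]
    by_cases hki : k = i
    · subst hki
      rw [if_neg (by omega), if_pos le_rfl, pvGetD_set, if_pos ⟨rfl, h⟩]
    · by_cases hik : i ≤ k
      · rw [if_pos (by omega), if_pos hik, pvGetD_set, if_neg (by omega)]
      · rw [if_neg (by omega), if_neg hik, pvGetD_set, if_neg (by omega)]
  | case2 C i h =>
    rw [mulModAux, dif_neg h]
    exact ⟨rfl, fun k hk => by rw [if_neg (by omega)]⟩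

lemma mobius_spec (i : Nat) (C : List Int) (h : i < C.length ∨ i = 0) :
    (lessMobiusAux C i).length = C.length ∧
    ∀ k, k < C.length → (lessMobiusAux C i).getD k 0 =
      if 1 ≤ k ∧ k ≤ i then (C.getD k 0 - C.getD (k - 1) 0).emod pvMod else C.getD k 0 := by
  induction i generalizing C with
  | zero =>
    exact ⟨rfl, fun k hk => by rw [if_neg (by omega)]; rfl⟩
  | succ i ih =>
    have hlt : i + 1 < C.length := by omega
    rw [lessMobiusAux]
    obtain ⟨ihl, ihc⟩ := ih (C.set (i + 1) ((C.getD (i + 1) 0 - C.getD i 0).emod pvMod))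
      (by by_cases hi0 : i = 0
          · exact Or.inr hi0
          · exact Or.inl (by simpa using (by omega : i < C.length)))
    refine ⟨by simpa using ihl, ?_⟩
    intro k hk
    rw [ihc k (by simpa using hk)]
    by_cases hki : k = i + 1
    · subst hki
      rw [if_neg (by omega), if_pos ⟨by omega, le_rfl⟩, pvGetD_set, if_pos ⟨rfl, hlt⟩]
      norm_num
    · by_cases hk1 : 1 ≤ k ∧ k ≤ i
      · rw [if_pos hk1, if_pos ⟨hk1.1, by omega⟩, pvGetD_set, if_neg (by omega),
          pvGetD_set, if_neg (by omega)]
      · rw [if_neg hk1, if_neg (by omega), pvGetD_set, if_neg (by omega)]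

lemma pvT_eq (A B : List Int) (k : Nat) :
    pvT A B k = pvPS A (k + 1) * pvPS B (k + 1) - pvPS A k * pvPS B k := by
  have hinner : ∀ i < k,
      (∑ j ∈ Finset.range (k + 1), (if max i j = k then A.getD i 0 * B.getD j 0 else 0))
        = A.getD i 0 * B.getD k 0 := by
    intro i hi
    have hcongr : ∀ j ∈ Finset.range (k + 1),
        (if max i j = k then A.getD i 0 * B.getD j 0 else 0)
          = (if j = k then A.getD i 0 * B.getD k 0 else 0) := by
      intro j hj
      have hj' := Finset.mem_range.1 hj
      rcases eq_or_ne j k with rfl | hjk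
      · rw [if_pos (by omega), if_pos rfl]
      · rw [if_neg (by omega), if_neg hjk]
    rw [Finset.sum_congr rfl hcongr,
      Finset.sum_ite_eq' (Finset.range (k + 1)) k (fun _ => A.getD i 0 * B.getD k 0),
      if_pos (Finset.mem_range.2 (by omega))]
  have hlast : (∑ j ∈ Finset.range (k + 1), (if max k j = k then A.getD k 0 * B.getD j 0 else 0))
      = A.getD k 0 * pvPS B (k + 1) := by
    rw [pvPS, Finset.mul_sum]
    apply Finset.sum_congr rfl
    intro j hj
    have hj' := Finset.mem_range.1 hj
    rw [if_pos (by omega)]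
  rw [pvT, Finset.sum_range_succ,
    Finset.sum_congr rfl (fun i hi => hinner i (Finset.mem_range.1 hi)), hlast,
    ← Finset.sum_mul]
  have ha : pvPS A (k + 1) = pvPS A k + A.getD k 0 := by
    simp [pvPS, Finset.sum_range_succ]
  have hb : pvPS B (k + 1) = pvPS B k + B.getD k 0 := by
    simp [pvPS, Finset.sum_range_succ]
  rw [ha, hb]; simp only [pvPS]
  ring

lemma A_char (A B : List Int) :
    (Convolution_MAX A B).length = max A.length B.length ∧
    ∀ k, k < max A.length B.length →
      (Convolution_MAX A B).getD k 0 = (pvT A B k).emod pvMod := by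
  have hps : ∀ (X : List Int) (n k : Nat), pvPS (X ++ List.replicate n 0) k = pvPS X k :=
    fun X n k => Finset.sum_congr rfl (fun i _ => pvGetD_pad X n i)
  simp only [Convolution_MAX]
  set L := max A.length B.length with hL
  set A1 := A ++ List.replicate (L - A.length) 0 with hA1
  set B1 := B ++ List.replicate (L - B.length) 0 with hB1
  have hA1len : A1.length = L := by
    simp [hA1]; omega
  have hB1len : B1.length = L := by
    simp [hB1]; omega
  obtain ⟨hzAl, hzA0, hzAk⟩ := zeta_spec A1 A1 1 le_rfl rfl (fun _ _ => rfl) rfl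
    (fun k h1 h2 => by omega)
  obtain ⟨hzBl, hzB0, hzBk⟩ := zeta_spec B1 B1 1 le_rfl rfl (fun _ _ => rfl) rfl
    (fun k h1 h2 => by omega)
  obtain ⟨hml, hmc⟩ := mulmod_spec (lessZetaAux B1 1) (lessZetaAux A1 1) 0
  have hA2len : (lessZetaAux A1 1).length = L := by rw [hzAl, hA1len]
  have hA3len : (mulModAux (lessZetaAux A1 1) (lessZetaAux B1 1) 0).length = L := by
    rw [hml, hA2len]
  have hP : ∀ k, k < L →
      (mulModAux (lessZetaAux A1 1) (lessZetaAux B1 1) 0).getD k 0 =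
        (pvPS A (k + 1) * pvPS B (k + 1)).emod pvMod := by
    intro k hk
    rw [hmc k (by omega), if_pos (Nat.zero_le k)]
    by_cases hk0 : k = 0
    · subst hk0
      rw [hzA0, hzB0]
      have ha : A1.getD 0 0 = pvPS A 1 := by
        rw [pvGetD_pad]; simp [pvPS]
      have hb : B1.getD 0 0 = pvPS B 1 := by
        rw [pvGetD_pad]; simp [pvPS]
      rw [ha, hb]
    · rw [hzAk k (by omega) (by omega), hzBk k (by omega) (by omega), hps, hps]
      exact (Int.mul_emod _ _ _).symm
  obtain ⟨hfl, hfc⟩ := mobius_spec (L - 1)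
    (mulModAux (lessZetaAux A1 1) (lessZetaAux B1 1) 0)
    (by by_cases h0 : L = 0
        · exact Or.inr (by omega)
        · exact Or.inl (by omega))
  refine ⟨by rw [hfl, hA3len], ?_⟩
  intro k hk
  rw [hfc k (by omega)]
  by_cases hk0 : k = 0
  · subst hk0
    rw [if_neg (by omega), hP 0 hk]
    have : pvT A B 0 = pvPS A 1 * pvPS B 1 := by
      rw [pvT_eq]; simp [pvPS]
    rw [this]
  · rw [if_pos ⟨by omega, by omega⟩, hP k hk, hP (k - 1) (by omega)]
    have hk1 : k - 1 + 1 = k := by omega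
    rw [hk1, pvT_eq]
    exact (Int.sub_emod _ _ _).symm

def pvStep (A B : List Int) (C : List Int) (p : Nat × Nat) : List Int :=
  C.set (max p.1 p.2) ((C.getD (max p.1 p.2) 0 + A.getD p.1 0 * B.getD p.2 0).emod pvMod)

def pvPairSum (A B : List Int) (ps : List (Nat × Nat)) (k : Nat) : Int :=
  (ps.map (fun p => if max p.1 p.2 = k then A.getD p.1 0 * B.getD p.2 0 else 0)).sum

lemma foldl_step_spec (A B : List Int) : ∀ (ps : List (Nat × Nat)) (C : List Int),
    (∀ p ∈ ps, max p.1 p.2 < C.length) →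
    (∀ k, (C.getD k 0).emod pvMod = C.getD k 0) →
    (ps.foldl (pvStep A B) C).length = C.length ∧
    ∀ k, k < C.length → (ps.foldl (pvStep A B) C).getD k 0 =
      (C.getD k 0 + pvPairSum A B ps k).emod pvMod := by
  intro ps
  induction ps with
  | nil =>
    intro C hmem hred
    exact ⟨rfl, fun k hk => by
      simp only [List.foldl_nil, pvPairSum, List.map_nil, List.sum_nil, add_zero]
      exact (hred k).symm⟩
  | cons p ps ih =>
    intro C hmem hred
    have hm : max p.1 p.2 < C.length := hmem p (List.mem_cons_self ..)
    simp only [List.foldl_cons]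
    obtain ⟨ihl, ihc⟩ := ih (pvStep A B C p)
      (by intro q hq
          simpa [pvStep, List.length_set] using hmem q (List.mem_cons_of_mem _ hq))
      (by intro k
          simp only [pvStep]
          rw [pvGetD_set]
          by_cases hkm : max p.1 p.2 = k ∧ max p.1 p.2 < C.length
          · rw [if_pos hkm]
            exact Int.emod_emod_of_dvd _ dvd_rfl
          · rw [if_neg hkm]
            exact hred k)
    have hlen' : (pvStep A B C p).length = C.length := by simp [pvStep, List.length_set]
    refine ⟨by rw [ihl, hlen'], ?_⟩
    intro k hk
    rw [ihc k (by omega)]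
    simp only [pvStep, pvPairSum, List.map_cons, List.sum_cons]
    rw [pvGetD_set]
    by_cases hkm : max p.1 p.2 = k
    · rw [if_pos ⟨hkm, hm⟩, if_pos hkm]
      exact (pvEmod_add_left _ _).trans (by rw [add_assoc, hkm]; rfl)
    · rw [if_neg (by intro hc; exact hkm hc.1), if_neg hkm, zero_add]

lemma sum_map_range (f : Nat → Int) (n : Nat) :
    ((List.range n).map f).sum = ∑ i ∈ Finset.range n, f i := by
  induction n with
  | zero => simp
  | succ n ih => simp [List.range_succ, Finset.sum_range_succ, ih]

lemma B_char (A B : List Int) :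
    (Convolution_MAX_alt A B).length = max A.length B.length ∧
    ∀ k, k < max A.length B.length →
      (Convolution_MAX_alt A B).getD k 0 =
        (∑ i ∈ Finset.range A.length, ∑ j ∈ Finset.range B.length,
          (if max i j = k then A.getD i 0 * B.getD j 0 else 0)).emod pvMod := by
  have halt : Convolution_MAX_alt A B =
      ((List.range A.length).flatMap
        (fun i => (List.range B.length).map (fun j => (i, j)))).foldl (pvStep A B)
        (List.replicate (max A.length B.length) 0) := by
    rw [List.foldl_flatMap]
    simp only [Convolution_MAX_alt, List.foldl_map, pvStep]
  obtain ⟨hl, hc⟩ := foldl_step_spec A B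
    ((List.range A.length).flatMap (fun i => (List.range B.length).map (fun j => (i, j))))
    (List.replicate (max A.length B.length) 0)
    (by intro p hp
        rw [List.mem_flatMap] at hp
        obtain ⟨i, hi, hp⟩ := hp
        rw [List.mem_map] at hp
        obtain ⟨j, hj, rfl⟩ := hp
        rw [List.mem_range] at hi hj
        simp only [List.length_replicate]
        omega)
    (by intro k
        by_cases hk : k < max A.length B.length
        · rw [List.getD_replicate _ hk]; rfl
        · rw [List.getD_eq_default _ _ (by simpa using (by omega : max A.length B.length ≤ k))]
          rfl)
  rw [halt]
  refine ⟨by rw [hl]; simp, ?_⟩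
  intro k hk
  rw [hc k (by simpa using hk), List.getD_replicate _ hk, zero_add]
  congr 1
  -- pvPairSum over the pair list equals the double Finset sum
  rw [pvPairSum, List.map_flatMap]
  simp only [List.map_map, Function.comp_def]
  have hflat : ∀ (l : List Nat) (g : Nat → List Int),
      (l.flatMap g).sum = (l.map (fun x => (g x).sum)).sum := by
    intro l g
    induction l with
    | nil => simp
    | cons x l ih => simp [List.flatMap_cons, List.sum_append, ih]
  rw [hflat, sum_map_range]
  exact Finset.sum_congr rfl (fun i _ => sum_map_range _ _)

lemma T_eq_sum (A B : List Int) (k : Nat) (hk : k < max A.length B.length) :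
    pvT A B k = ∑ i ∈ Finset.range A.length, ∑ j ∈ Finset.range B.length,
      (if max i j = k then A.getD i 0 * B.getD j 0 else 0) := by
  have hext : ∀ (g : Nat → Int) (n R : Nat), n ≤ R → (∀ i, n ≤ i → g i = 0) →
      ∑ i ∈ Finset.range n, g i = ∑ i ∈ Finset.range R, g i := by
    intro g n R hn h0
    refine Finset.sum_subset (fun x hx => ?_) (fun i _ hni => ?_)
    · exact Finset.mem_range.2 (lt_of_lt_of_le (Finset.mem_range.1 hx) hn)
    · exact h0 i (by rw [Finset.mem_range] at hni; omega)
  have hk1 : k + 1 ≤ max A.length B.length := by omega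
  have step1 : pvT A B k =
      ∑ i ∈ Finset.range (max A.length B.length), ∑ j ∈ Finset.range (max A.length B.length),
        (if max i j = k then A.getD i 0 * B.getD j 0 else 0) := by
    rw [pvT]
    rw [Finset.sum_congr rfl (fun i _ =>
      hext (fun j => if max i j = k then A.getD i 0 * B.getD j 0 else 0) (k + 1) _ hk1
        (fun j hj => by
          show (if max i j = k then A.getD i 0 * B.getD j 0 else 0) = 0
          rw [if_neg (by omega)]))]
    exact hext _ (k + 1) _ hk1 (fun i hi =>
      Finset.sum_eq_zero (fun j _ => by rw [if_neg (by omega)]))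

  have step2 : (∑ i ∈ Finset.range A.length, ∑ j ∈ Finset.range B.length,
        (if max i j = k then A.getD i 0 * B.getD j 0 else 0)) =
      ∑ i ∈ Finset.range (max A.length B.length), ∑ j ∈ Finset.range (max A.length B.length),
        (if max i j = k then A.getD i 0 * B.getD j 0 else 0) := by
    rw [Finset.sum_congr rfl (fun i _ =>
      hext (fun j => if max i j = k then A.getD i 0 * B.getD j 0 else 0) B.length _
        (le_max_right _ _)
        (fun j hj => by
          show (if max i j = k then A.getD i 0 * B.getD j 0 else 0) = 0
          rw [show B.getD j 0 = 0 from List.getD_eq_default _ _ hj]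
          split <;> simp))]
    exact hext _ A.length _ (le_max_left _ _) (fun i hi =>
      Finset.sum_eq_zero (fun j _ => by
        rw [show A.getD i 0 = 0 from List.getD_eq_default _ _ hi]
        split <;> simp))
  rw [step1, step2]

lemma main_eq (A B : List Int) : Convolution_MAX A B = Convolution_MAX_alt A B := by
  obtain ⟨hal, hac⟩ := A_char A B
  obtain ⟨hbl, hbc⟩ := B_char A B
  apply List.ext_getElem (by omega)
  intro k h1 h2
  rw [← List.getD_eq_getElem _ 0 h1, ← List.getD_eq_getElem _ 0 h2]
  rw [hac k (by omega), hbc k (by omega), T_eq_sum A B k (by omega)]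

-- ===== VERDICT (by name: the statement is the Claim_ definition above) =====
theorem Convolution_MAX_spec : Claim_equal_Convolution_MAX := by
  intro A B _
  unfold Spec_Convolution_MAX
  exact main_eq A B
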